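-- pv_equiv track=rewrite | github.com/pradeepappala/practice_python | HackerRank/array_partition.py | solve
-- ===== SOURCE A (Python) =====
-- import math
-- import itertools
-- from functools import reduce
--
-- def prod(x, y):
--     return x*y
--
-- def solve(a):
--     b = set(a)
--     res = []
--     for i in range(1, len(b)):
--         for j in itertools.combinations(b, i):
--             res.append((set(j), b.difference(j)))
--
--     count = 0
--     for i in range(len(res)):
--         if math.gcd(reduce(prod, res[i][0]), reduce(prod, res[i][1])) == 1:
--             count += 1
--
--     return count
-- ===== SOURCE B (Python) =====
-- import math
--
--
-- def solve(a):
--     # Count ordered two-way partitions of the distinct values whose side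
--     # products are coprime, by assigning each value to one side recursively.
--     vals = list(dict.fromkeys(a))
--
--     def go(rest, p, q, has_p, has_q):
--         if not rest:
--             return 1 if has_p and has_q and math.gcd(p, q) == 1 else 0
--         x = rest[0]
--         return (go(rest[1:], p * x, q, True, has_q)
--                 + go(rest[1:], p, x * q, has_p, True))
--
--     return go(vals, 1, 1, False, False)
-- ===== Notes on version B (the rewrite author's own statement) =====
-- stated objective: alternative
-- what changed: Replaces the two-phase enumeration (materialising every (subset, complement) pair via itertools.combinations by size, then a second reduce/gcd pass) with a single binary recursion that assigns each distinct value to one of the two sides, maintaining both running products and non-emptiness flags, so no subset lists, set differences or reduce calls are built.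
import Mathlib
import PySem

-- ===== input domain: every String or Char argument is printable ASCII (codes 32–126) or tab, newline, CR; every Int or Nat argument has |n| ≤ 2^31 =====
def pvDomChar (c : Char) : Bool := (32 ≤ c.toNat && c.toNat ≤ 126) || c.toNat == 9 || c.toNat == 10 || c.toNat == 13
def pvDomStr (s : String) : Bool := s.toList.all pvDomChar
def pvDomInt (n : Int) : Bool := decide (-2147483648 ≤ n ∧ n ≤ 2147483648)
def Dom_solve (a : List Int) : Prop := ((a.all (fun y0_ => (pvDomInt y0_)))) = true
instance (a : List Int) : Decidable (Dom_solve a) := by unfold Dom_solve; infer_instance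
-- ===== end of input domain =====

-- B replaces A's size-by-size subset enumeration (materialised (subset, complement) pairs,
-- then a reduce/gcd pass) with one binary recursion assigning each distinct value to a side
-- while maintaining the two running products; same value on every input (alternative algorithm).

-- ===== PORT A =====
-- reduce(prod, xs): Python's functools.reduce with no initialiser; the [] case raises in
-- Python and is unreachable here (every reduced list is nonempty: subset sizes run 1..n-1).
def reduceProd : List Int → Int
  | [] => 0
  | x :: xs => xs.foldl (fun acc y => acc * y) x

-- itertools.combinations(l, k) over the sequence l, in Python's emission order.
def combos : Nat → List Int → List (List Int)
  | 0, _ => [[]]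
  | _ + 1, [] => []
  | k + 1, x :: xs => (combos k xs).map (fun j => x :: j) ++ combos (k + 1) xs

def solve (a : List Int) : Int :=
  let b : PySem.Set Int := PySem.Set.ofList a
  let res : List (List Int × List Int) :=
    (PySem.List.pyRange 1 (PySem.List.len b)).foldl
      (fun res i =>
        (combos i.toNat b).foldl
          (fun res j => res ++ [(PySem.Set.ofList j, PySem.Set.diff b j)]) res)
      []
  (PySem.List.pyRange 0 (PySem.List.len res)).foldl
    (fun count i =>
      let r := PySem.List.pyGetD res i ([], [])
      if Int.gcd (reduceProd r.1) (reduceProd r.2) = 1 then count + 1 else count)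
    0

-- ===== PORT B =====
def goB : List Int → Int → Int → Bool → Bool → Int
  | [], p, q, hp, hq => if hp && hq && (Int.gcd p q == 1) then 1 else 0
  | x :: rest, p, q, hp, hq =>
      goB rest (p * x) q true hq + goB rest p (x * q) hp true

def solve_alt (a : List Int) : Int :=
  goB (PySem.List.dedup a) 1 1 false false

-- ===== PRECONDITION & SPEC =====
def Spec_solve (a : List Int) (out : Int) : Prop := out = solve_alt a
instance (a : List Int) (out : Int) : Decidable (Spec_solve a out) := by unfold Spec_solve; infer_instance

-- ===== CLAIM (what is proved, stated in full; the proofs are below) =====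
def Claim_equal_solve : Prop := ∀ (a : List Int), Dom_solve a → Spec_solve a (solve a)

-- ===== LEMMAS AND PROOFS =====

-- complement of j inside b (in b's order); Set.diff b j is definitionally this filter
def pvCompl (b j : List Int) : List Int := b.filter (fun x => !(j.contains x))

-- the common predicate: j is a nonempty proper part with coprime side products
def G (b : List Int) (j : List Int) : Bool :=
  !j.isEmpty && !(pvCompl b j).isEmpty && (Int.gcd j.prod (pvCompl b j).prod == 1)

-- all two-sided assignments of the elements of a list
def splits : List Int → List (List Int × List Int)
  | [] => [([], [])]
  | x :: r => (splits r).flatMap (fun st => [(x :: st.1, st.2), (st.1, x :: st.2)])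

-- all combinations of every size 0..length
def allCombos (l : List Int) : List (List Int) :=
  (List.range (l.length + 1)).flatMap (fun i => combos i l)

lemma countP_flatMap_pair {α β : Type} (p : β → Bool) (f g : α → β) (l : List α) :
    (l.flatMap (fun a => [f a, g a])).countP p = l.countP (fun a => p (f a)) + l.countP (fun a => p (g a)) := by
  induction l with
  | nil => rfl
  | cons x xs ih =>
    simp [List.flatMap_cons, List.countP_cons, ih]
    by_cases h1 : p (f x) <;> by_cases h2 : p (g x) <;> simp [h1, h2] <;> omega

lemma flatMap_append_perm {α β : Type} (f g : α → List β) (l : List α) :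
    (l.flatMap (fun a => f a ++ g a)).Perm (l.flatMap f ++ l.flatMap g) := by
  induction l with
  | nil => simp
  | cons x xs ih =>
    simp only [List.flatMap_cons, List.append_assoc]
    exact List.Perm.append_left (f x)
      ((List.Perm.append_left (g x) ih).trans (List.perm_append_comm_assoc _ _ _))

lemma flatMap_single {α β : Type} (f : α → β) (l : List α) :
    l.flatMap (fun a => [f a]) = l.map f := by
  induction l with
  | nil => rfl
  | cons x xs ih => simp [List.flatMap_cons, ih]

lemma reduceProd_eq_prod (l : List Int) (h : l ≠ []) : reduceProd l = l.prod := by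
  match l with
  | x :: xs =>
    show xs.foldl (fun acc y => acc * y) x = _
    rw [List.prod_cons]
    induction xs generalizing x with
    | nil => simp
    | cons y ys ih => simp [List.foldl_cons, ih, mul_assoc]

lemma combos_mem (k : Nat) (l j : List Int) (h : j ∈ combos k l) :
    j.Sublist l ∧ j.length = k := by
  induction l generalizing k j with
  | nil =>
    cases k with
    | zero => simp [combos] at h; simp [h]
    | succ k => simp [combos] at h
  | cons x xs ih =>
    cases k with
    | zero => simp [combos] at h; simp [h]
    | succ k =>
      simp only [combos, List.mem_append, List.mem_map] at h
      rcases h with ⟨j', hj', rfl⟩ | h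
      · obtain ⟨hs, hl⟩ := ih k j' hj'
        exact ⟨hs.cons_cons x, by simp [hl]⟩
      · obtain ⟨hs, hl⟩ := ih (k+1) j h
        exact ⟨hs.cons _, hl⟩

lemma combos_eq_nil (k : Nat) (l : List Int) (h : l.length < k) : combos k l = [] := by
  induction l generalizing k with
  | nil => cases k with
    | zero => simp at h
    | succ k => rfl
  | cons x xs ih =>
    cases k with
    | zero => simp at h
    | succ k =>
      simp only [combos]
      rw [ih k (by simpa using h), ih (k+1) (by simp at h; omega)]
      rfl

lemma combos_length_self (l : List Int) : combos l.length l = [l] := by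
  induction l with
  | nil => rfl
  | cons x xs ih =>
    show (combos xs.length xs).map _ ++ combos (xs.length + 1) xs = _
    rw [ih, combos_eq_nil _ _ (by omega)]
    rfl

lemma ofList_eq_self (l : List Int) (h : l.Nodup) : PySem.Set.ofList l = l := by
  have key : ∀ (j s : List Int), (s ++ j).Nodup → j.foldl PySem.Set.add s = s ++ j := by
    intro j
    induction j with
    | nil => simp
    | cons x xs ih =>
      intro s hs
      have hx : x ∉ s := fun hmem =>
        (List.nodup_append.mp hs).2.2 x hmem x (by simp) rfl
      show List.foldl _ (PySem.Set.add s x) xs = _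
      rw [show PySem.Set.add s x = s ++ [x] by simp [PySem.Set.add, hx]]
      rw [ih (s ++ [x]) (by simpa using hs)]
      simp
  simpa using key l [] (by simpa using h)

lemma goB_eq_countP (rest : List Int) (p q : Int) (hp hq : Bool) :
    goB rest p q hp hq =
      ((splits rest).countP (fun st =>
        (hp || !st.1.isEmpty) && (hq || !st.2.isEmpty) &&
        (Int.gcd (p * st.1.prod) (q * st.2.prod) == 1)) : Int) := by
  induction rest generalizing p q hp hq with
  | nil => simp [goB, splits, List.countP_cons]
  | cons x r ih =>
    show goB r (p * x) q true hq + goB r p (x * q) hp true = _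
    rw [ih, ih]
    show _ = ((splits (x :: r)).countP _ : Int)
    rw [show splits (x :: r) = (splits r).flatMap
      (fun st => [(x :: st.1, st.2), (st.1, x :: st.2)]) from rfl]
    rw [countP_flatMap_pair]
    push_cast
    congr 1
    · congr 1
      apply List.countP_congr
      intro st _
      simp only [List.isEmpty_cons, List.prod_cons, Bool.not_false, Bool.true_or]
      constructor <;> intro hh <;>
        simpa [mul_assoc, mul_comm, mul_left_comm] using hh
    · congr 1
      apply List.countP_congr
      intro st _
      simp only [List.isEmpty_cons, List.prod_cons, Bool.not_false, Bool.true_or]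
      constructor <;> intro hh <;>
        simpa [mul_assoc, mul_comm, mul_left_comm] using hh

lemma splits_snd_compl (r : List Int) (hr : r.Nodup) :
    ∀ st ∈ splits r, st.2 = pvCompl r st.1 ∧ st.1.Sublist r := by
  induction r with
  | nil => intro st hst; simp [splits] at hst; simp [hst, pvCompl]
  | cons x r' ih =>
    intro st hst
    have hx : x ∉ r' := (List.nodup_cons.mp hr).1
    have hr' : r'.Nodup := (List.nodup_cons.mp hr).2
    simp only [splits, List.mem_flatMap, List.mem_cons] at hst
    obtain ⟨⟨s, t⟩, hmem, hst⟩ := hst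
    obtain ⟨ht, hs⟩ := ih hr' _ hmem
    have hsub : s ⊆ r' := hs.subset
    rcases hst with rfl | rfl | h
    · refine ⟨?_, hs.cons_cons x⟩
      show t = pvCompl (x :: r') (x :: s)
      have hc : (x :: s).contains x = true := by simp
      simp only [pvCompl, List.filter_cons, hc, Bool.not_true, Bool.false_eq_true, if_false]
      rw [show t = pvCompl r' s from ht]
      show List.filter _ r' = List.filter _ r'
      apply List.filter_congr
      intro y hy
      have hyx : y ≠ x := fun hyx => hx (hyx ▸ hy)
      simp [hyx]
    · refine ⟨?_, hs.cons x⟩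
      show x :: t = pvCompl (x :: r') s
      have hxs : x ∉ s := fun hmm => hx (hsub hmm)
      have hc : s.contains x = false := by simpa [List.contains_iff_mem] using hxs
      simp only [pvCompl, List.filter_cons, hc, Bool.not_false, if_true]
      rw [show t = pvCompl r' s from ht]
      rfl
    · exact absurd h (by simp)

lemma map_fst_splits_perm (l : List Int) : ((splits l).map Prod.fst).Perm (allCombos l) := by
  induction l with
  | nil => simp [splits, allCombos, combos]
  | cons x r ih =>
    have step1 : ((splits (x :: r)).map Prod.fst) =
        (splits r).flatMap (fun st => [x :: st.1] ++ [st.1]) := by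
      show ((splits r).flatMap _).map Prod.fst = _
      rw [List.map_flatMap]
      rfl
    have step2 : ((splits (x :: r)).map Prod.fst).Perm
        (((splits r).map Prod.fst).map (fun j => x :: j) ++ (splits r).map Prod.fst) := by
      rw [step1]
      refine (flatMap_append_perm _ _ _).trans ?_
      have e1 : (splits r).flatMap (fun st => [x :: st.1]) =
          ((splits r).map Prod.fst).map (fun j => x :: j) := by
        rw [flatMap_single (fun st : List Int × List Int => x :: st.1), List.map_map]
        rfl
      have e2 : (splits r).flatMap (fun st : List Int × List Int => [st.1]) =
          (splits r).map Prod.fst := flatMap_single Prod.fst (splits r)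
      rw [e1, e2]
    have mid : allCombos (x :: r) = [[]] ++
        ((List.range (r.length + 1)).flatMap
          (fun i => (combos i r).map (fun j => x :: j) ++ combos (i + 1) r)) := by
      show (List.range (r.length + 1 + 1)).flatMap (fun i => combos i (x :: r)) = _
      rw [List.range_succ_eq_map, List.flatMap_cons, List.flatMap_map]
      rfl
    have tailpart : (List.range (r.length + 1)).flatMap (fun i => combos (i + 1) r) =
        (List.range r.length).flatMap (fun i => combos (i + 1) r) := by
      rw [List.range_succ, List.flatMap_append]
      simp [combos_eq_nil (r.length + 1) r (by omega)]
    have acr : allCombos r = [[]] ++ (List.range r.length).flatMap (fun i => combos (i + 1) r) := by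
      show (List.range (r.length + 1)).flatMap (fun i => combos i r) = _
      rw [List.range_succ_eq_map, List.flatMap_cons, List.flatMap_map]
      simp [combos]
    have mapped : (List.range (r.length + 1)).flatMap (fun i => (combos i r).map (fun j => x :: j)) =
        (allCombos r).map (fun j => x :: j) := by
      rw [allCombos, List.map_flatMap]
    refine step2.trans ?_
    have : allCombos (x :: r) =
        [[]] ++ ((List.range (r.length + 1)).flatMap
          (fun i => (combos i r).map (fun j => x :: j) ++ combos (i + 1) r)) := mid
    rw [this]
    refine ((ih.map _).append ih).trans ?_
    refine List.Perm.symm ?_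
    refine (List.Perm.append_left _ (flatMap_append_perm _ _ _)).trans ?_
    rw [mapped, tailpart]
    exact (List.perm_append_comm_assoc [[]] ((allCombos r).map (fun j => x :: j))
      ((List.range r.length).flatMap (fun i => combos (i + 1) r))).trans (by rw [← acr])

lemma pyRange_one_eq (n : Nat) :
    PySem.List.pyRange 1 (n : Int) = (List.range' 1 (n - 1)).map (Nat.cast : Nat → Int) := by
  induction n with
  | zero => rfl
  | succ m ih =>
    by_cases hm : m = 0
    · subst hm; rfl
    · have h1 : (1 : Int) ≤ (m : Int) := by omega
      have : ((m + 1 : Nat) : Int) = (m : Int) + 1 := by push_cast; ring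
      rw [this, PySem.List.pyRange_one_succ_right h1, ih]
      have hm1 : m + 1 - 1 = (m - 1) + 1 := by omega
      rw [hm1, List.range'_concat, List.map_append]
      congr 1
      have : 1 + 1 * (m - 1) = m := by omega
      rw [this]
      rfl

-- A's value is the count of G over the middle sizes, hence over allCombos
lemma countP_key (res : List (List Int × List Int)) :
    (PySem.List.pyRange 0 (PySem.List.len res)).foldl
      (fun count i =>
        let r := PySem.List.pyGetD res i ([], [])
        if Int.gcd (reduceProd r.1) (reduceProd r.2) = 1 then count + 1 else count) 0
    = ((res.countP (fun r => decide (Int.gcd (reduceProd r.1) (reduceProd r.2) = 1))) : Int) := by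
  have h := PySem.List.foldl_pyRange_pyGetD res (([], []) : List Int × List Int)
      (fun (count : Int) r =>
        if Int.gcd (reduceProd r.1) (reduceProd r.2) = 1 then count + 1 else count)
      0 (le_refl 0)
  rw [show ((0 : Int).toNat) = 0 from rfl, List.drop_zero] at h
  exact h.trans (by rw [PySem.List.foldl_ite_add_one]; simp)

lemma res_shape (a : List Int) :
    (PySem.List.pyRange 1 (PySem.List.len (PySem.Set.ofList a))).foldl
      (fun res i =>
        (combos i.toNat (PySem.Set.ofList a)).foldl
          (fun res j => res ++ [(PySem.Set.ofList j, PySem.Set.diff (PySem.Set.ofList a) j)]) res)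
      [] =
    (List.range' 1 ((PySem.Set.ofList a).length - 1)).flatMap
      (fun k => (combos k (PySem.Set.ofList a)).map
        (fun j => (PySem.Set.ofList j, PySem.Set.diff (PySem.Set.ofList a) j))) := by
  simp only [PySem.List.foldl_append_singleton_eq_map]
  rw [PySem.List.foldl_append_eq_flatMap, List.nil_append]
  rw [PySem.List.len_eq, pyRange_one_eq, List.flatMap_map]
  congr 1


lemma allCombos_split (b : List Int) (hn : 1 ≤ b.length) :
    allCombos b = combos 0 b ++ (List.range' 1 (b.length - 1)).flatMap (fun k => combos k b)
      ++ combos b.length b := by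
  have hr : List.range b.length = 0 :: List.range' 1 (b.length - 1) := by
    rw [List.range_eq_range']
    conv_lhs => rw [show b.length = (b.length - 1) + 1 from by omega]
    rw [List.range'_succ]
  show (List.range (b.length + 1)).flatMap (fun i => combos i b) = _
  rw [List.range_succ, List.flatMap_append, hr, List.flatMap_cons]
  simp [List.append_assoc]

lemma solve_eq_countP (a : List Int) :
    solve a = ((allCombos (PySem.Set.ofList a)).countP (G (PySem.Set.ofList a)) : Int) := by
  have hnd : (PySem.Set.ofList a).Nodup := PySem.Set.nodup_ofList a
  unfold solve
  simp only [countP_key, res_shape]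
  set b := PySem.Set.ofList a with hb
  set n := b.length with hn
  rw [← List.map_flatMap, List.countP_map]
  congr 1
  -- pointwise on the middle sizes the predicate is G b
  have hmid : ((List.range' 1 (n - 1)).flatMap (fun k => combos k b)).countP
      ((fun r => decide (Int.gcd (reduceProd r.1) (reduceProd r.2) = 1)) ∘
        (fun j => (PySem.Set.ofList j, PySem.Set.diff b j))) =
      ((List.range' 1 (n - 1)).flatMap (fun k => combos k b)).countP (G b) := by
    apply List.countP_congr
    intro j hj
    obtain ⟨k, hk, hjk⟩ := List.mem_flatMap.mp hj
    obtain ⟨hk1, hk2⟩ := List.mem_range'_1.mp hk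
    obtain ⟨hsub, hlen⟩ := combos_mem k b j hjk
    have hkn : k < n := by omega
    have hjne : j ≠ [] := by
      intro h; rw [h] at hlen; simp at hlen; omega
    have hjnd : j.Nodup := List.Nodup.sublist hsub hnd
    have hofl : PySem.Set.ofList j = j := ofList_eq_self j hjnd
    have hdiff : PySem.Set.diff b j = pvCompl b j := rfl
    have hcne : pvCompl b j ≠ [] := by
      intro hc
      have hsubb : ∀ x ∈ b, x ∈ j := by
        intro x hx
        have := List.filter_eq_nil_iff.mp hc x hx
        simpa [List.contains_iff_mem] using this
      have := (List.Nodup.subperm hnd hsubb).length_le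
      omega
    simp only [Function.comp_apply, hofl, hdiff, G,
      reduceProd_eq_prod j hjne, reduceProd_eq_prod _ hcne]
    simp [hjne, hcne]
  rw [hmid]
  by_cases hn0 : n = 0
  · have hbnil : b = [] := List.length_eq_zero_iff.mp hn0
    rw [hn0, hbnil]
    rfl
  · rw [allCombos_split b (by omega), List.countP_append, List.countP_append]
    have h0 : (combos 0 b).countP (G b) = 0 := by
      simp [combos, G]
    have hself : (combos n b).countP (G b) = 0 := by
      rw [hn, combos_length_self]
      have hcb : pvCompl b b = [] := by
        apply List.filter_eq_nil_iff.mpr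
        intro x hx
        simp [hx]
      simp [G, hcb]
    rw [h0, hself, ← hn]
    omega

lemma solve_alt_eq_countP (a : List Int) :
    solve_alt a = ((allCombos (PySem.Set.ofList a)).countP (G (PySem.Set.ofList a)) : Int) := by
  have hnd : (PySem.Set.ofList a).Nodup := PySem.Set.nodup_ofList a
  show goB (PySem.List.dedup a) 1 1 false false = _
  rw [show PySem.List.dedup a = PySem.Set.ofList a from rfl]
  set b := PySem.Set.ofList a with hb
  rw [goB_eq_countP]
  congr 1
  have hcong : (splits b).countP (fun st =>
      (false || !st.1.isEmpty) && (false || !st.2.isEmpty) &&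
      (Int.gcd (1 * st.1.prod) (1 * st.2.prod) == 1)) =
      (splits b).countP (fun st => G b st.1) := by
    apply List.countP_congr
    intro st hst
    obtain ⟨h2, _⟩ := splits_snd_compl b hnd st hst
    simp [G, h2, one_mul]
  rw [hcong]
  have : (splits b).countP (fun st => G b st.1) = ((splits b).map Prod.fst).countP (G b) := by
    rw [List.countP_map]
    rfl
  rw [this]
  exact (map_fst_splits_perm b).countP_eq (G b)

-- ===== VERDICT (by name: the statement is the Claim_ definition above) =====
theorem solve_spec : Claim_equal_solve := by
  intro a _
  unfold Spec_solve
  rw [solve_eq_countP, solve_alt_eq_countP]
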